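-- pv_equiv track=rewrite | github.com/sriinath/GSheetsService | routes/SheetValues.py | __construct_mapped_dict
-- ===== SOURCE A (Python) =====
-- def __construct_mapped_dict(lists, fields, row_info):
--     constructed_data_list=list()
--     available_attr_index=list()
--     list_len=len(lists)
--     if list_len:
--         constructed_mapping=dict()
--         constructed_mapping['index']=dict()
--         for row_index, row in enumerate(lists):
--             if row_info:
--                 temp_dict=dict(row=row_index)
--             else:
--                 temp_dict=dict()
--             for attr_index, attr in enumerate(row):
--                 if row_index == 0:
--                     if fields is not None and len(fields):
--                         if attr in fields:
--                             available_attr_index.append(attr_index)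
--                             constructed_mapping['index'][attr_index]=attr
--                     else:
--                         available_attr_index.append(attr_index)
--                         constructed_mapping['index'][attr_index]=attr
--                 else:
--                     if attr_index in constructed_mapping['index']:
--                         temp_dict[constructed_mapping['index'][attr_index]]=attr
--             if row_index != 0:
--                 constructed_data_list.append(temp_dict)
--     return constructed_data_list
-- ===== SOURCE B (Python) =====
-- def __construct_mapped_dict(lists, fields, row_info):
--     if not lists:
--         return []
--     header, rows = lists[0], lists[1:]
--     result = [dict(row=i) if row_info else {} for i in range(1, len(lists))]
--     for j, name in enumerate(header):
--         if fields and name not in fields: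
--             continue
--         for d, row in zip(result, rows):
--             if j < len(row):
--                 d[name] = row[j]
--     return result
-- ===== Notes on version B (the rewrite author's own statement) =====
-- stated objective: alternative
-- what changed: B is column-major with no index dict at all: it first creates every row's dict, then for each kept header column writes that column's value into each row dict in one inner zip pass, whereas A is a single row-major loop that builds an attr_index->name dict on row 0 and scans every cell of every row against it.
-- outside the precondition, e.g. on __construct_mapped_dict([['h'], ['x']], None, True): A returns [{'row': 1, 'h': 'x'}], B returns [{'row': 1, 'h': 'x'}]
import Mathlib
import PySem

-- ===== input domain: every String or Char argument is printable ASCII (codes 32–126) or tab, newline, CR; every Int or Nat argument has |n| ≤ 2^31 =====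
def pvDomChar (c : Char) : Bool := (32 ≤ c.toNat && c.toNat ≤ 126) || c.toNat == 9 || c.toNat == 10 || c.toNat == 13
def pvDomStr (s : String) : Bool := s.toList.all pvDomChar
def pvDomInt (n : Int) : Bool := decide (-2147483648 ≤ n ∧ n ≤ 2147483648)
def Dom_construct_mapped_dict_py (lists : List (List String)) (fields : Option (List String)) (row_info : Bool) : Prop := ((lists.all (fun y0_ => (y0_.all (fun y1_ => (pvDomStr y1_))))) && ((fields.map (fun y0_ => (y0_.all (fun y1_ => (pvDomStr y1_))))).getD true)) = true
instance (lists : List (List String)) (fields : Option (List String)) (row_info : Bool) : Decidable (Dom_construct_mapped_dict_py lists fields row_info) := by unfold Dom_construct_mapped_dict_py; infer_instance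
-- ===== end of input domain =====

-- B (objective: alternative): column-major construction — every row dict is created up front, then each kept header column is written into all row dicts in one zip pass; A is a single row-major loop building an index dict on row 0. Same return values. Both ports render the integer value of Python's 'row' key as its decimal string (the declared value type is String).


-- ===== PORT A =====
-- Transliteration of __construct_mapped_dict. Python's constructed_mapping is a dict
-- with the single key 'index'; the port carries that inner index dict directly as the
-- fold state component. dict(row=row_index) carries an int; it is rendered as its
-- decimal string (the declared value type is String).
def construct_mapped_dict_py (lists : List (List String)) (fields : Option (List String)) (row_info : Bool) : List (List (String × String)) :=
  let constructed_data_list : List (List (String × String)) := []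
  if lists.length ≠ 0 then
    let st :=
      (PySem.List.enumerate lists 0).foldl
        (fun (st : List (List (String × String)) × List Int × PySem.Dict Int String) rr =>
          let cdl := st.1
          let row_index := rr.1
          let row := rr.2
          let temp0 : PySem.Dict String String :=
            if row_info then PySem.Dict.empty.insert "row" (PySem.Int.toStr row_index)
            else PySem.Dict.empty
          let inner :=
            (PySem.List.enumerate row 0).foldl
              (fun (s2 : PySem.Dict String String × List Int × PySem.Dict Int String) aa =>
                let temp := s2.1
                let avail := s2.2.1
                let idx := s2.2.2
                let attr_index := aa.1
                let attr := aa.2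
                if row_index == 0 then
                  match fields with
                  | some fs =>
                    if fs.length ≠ 0 then
                      if fs.contains attr then
                        (temp, avail ++ [attr_index], idx.insert attr_index attr)
                      else (temp, avail, idx)
                    else (temp, avail ++ [attr_index], idx.insert attr_index attr)
                  | none => (temp, avail ++ [attr_index], idx.insert attr_index attr)
                else
                  if idx.contains attr_index then
                    (temp.insert (idx.getD attr_index "") attr, avail, idx)
                  else (temp, avail, idx))
              (temp0, st.2.1, st.2.2)
          (if row_index != 0 then cdl ++ [inner.1.items] else cdl, inner.2.1, inner.2.2))
        (constructed_data_list, ([], PySem.Dict.empty))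
    st.1
  else constructed_data_list

-- ===== PORT B =====
-- Transliteration of Source B: result0 is the comprehension creating one dict per data row
-- ('row' key rendered as above); the outer loop runs over the HEADER's columns, skipping
-- columns not kept, and each step writes that column into every row dict via zip.
def construct_mapped_dict_py_alt (lists : List (List String)) (fields : Option (List String)) (row_info : Bool) : List (List (String × String)) :=
  match lists with
  | [] => []
  | header :: rows =>
    let result0 : List (PySem.Dict String String) :=
      (PySem.List.pyRange 1 ((header :: rows).length : Int) 1).map (fun i =>
        if row_info then PySem.Dict.empty.insert "row" (PySem.Int.toStr i)
        else PySem.Dict.empty)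
    let final :=
      (PySem.List.enumerate header 0).foldl
        (fun (res : List (PySem.Dict String String)) jn =>
          if (match fields with
              | some fs => !fs.isEmpty && !fs.contains jn.2
              | none => false) then res
          else
            (res.zip rows).map (fun p =>
              if jn.1 < (p.2.length : Int) then p.1.insert jn.2 (PySem.List.pyGetD p.2 jn.1 "")
              else p.1))
        result0
    final.map (fun d => d.items)

-- ===== PRECONDITION & SPEC =====
-- Pre_ excludes only inputs with row_info=true and at least one data row: there the
-- Python A returns dicts whose 'row' key holds the INT row index — a value outside the
-- declared return type list[dict[str,str]], unrepresentable by the String-valued ports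
-- (Python B returns the identical value there; nothing about B is hidden).
def Pre_construct_mapped_dict_py (lists : List (List String)) (fields : Option (List String)) (row_info : Bool) : Prop :=
  row_info = true → lists.length ≤ 1
instance (lists : List (List String)) (fields : Option (List String)) (row_info : Bool) : Decidable (Pre_construct_mapped_dict_py lists fields row_info) := by unfold Pre_construct_mapped_dict_py; infer_instance
def pvWitness_construct_mapped_dict_py : List (List String) × Option (List String) × Bool :=
  ([["h1", "h2"], ["x", "y"], ["p"]], some ["h2"], false)

def Spec_construct_mapped_dict_py (lists : List (List String)) (fields : Option (List String)) (row_info : Bool) (out : List (List (String × String))) : Prop := out = construct_mapped_dict_py_alt lists fields row_info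
instance (lists : List (List String)) (fields : Option (List String)) (row_info : Bool) (out : List (List (String × String))) : Decidable (Spec_construct_mapped_dict_py lists fields row_info out) := by unfold Spec_construct_mapped_dict_py; infer_instance

-- ===== CLAIM (what is proved, stated in full; the proofs are below) =====
def Claim_equal_construct_mapped_dict_py : Prop := ∀ (lists : List (List String)) (fields : Option (List String)) (row_info : Bool), Dom_construct_mapped_dict_py lists fields row_info → Pre_construct_mapped_dict_py lists fields row_info → Spec_construct_mapped_dict_py lists fields row_info (construct_mapped_dict_py lists fields row_info)

-- ===== LEMMAS AND PROOFS =====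

-- Named copies of the ports' step functions (definitionally equal to the inline lambdas).
def pvKeep (fields : Option (List String)) (name : String) : Bool :=
  match fields with
  | none => true
  | some fs => fs.isEmpty || fs.contains name

def pvIdx (fields : Option (List String)) (header : List String) : List (Int × String) :=
  (PySem.List.enumerate header 0).filterMap (fun p => if pvKeep fields p.2 then some p else none)

def pvTemp0 (row_info : Bool) (ri : Int) : PySem.Dict String String :=
  if row_info then PySem.Dict.empty.insert "row" (PySem.Int.toStr ri) else PySem.Dict.empty

def pvInnerA (fields : Option (List String)) (row_index : Int)
    (s2 : PySem.Dict String String × List Int × PySem.Dict Int String) (aa : Int × String) :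
    PySem.Dict String String × List Int × PySem.Dict Int String :=
  let temp := s2.1
  let avail := s2.2.1
  let idx := s2.2.2
  let attr_index := aa.1
  let attr := aa.2
  if row_index == 0 then
    match fields with
    | some fs =>
      if fs.length ≠ 0 then
        if fs.contains attr then
          (temp, avail ++ [attr_index], idx.insert attr_index attr)
        else (temp, avail, idx)
      else (temp, avail ++ [attr_index], idx.insert attr_index attr)
    | none => (temp, avail ++ [attr_index], idx.insert attr_index attr)
  else
    if idx.contains attr_index then
      (temp.insert (idx.getD attr_index "") attr, avail, idx)
    else (temp, avail, idx)

def pvOuterA (fields : Option (List String)) (row_info : Bool)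
    (st : List (List (String × String)) × List Int × PySem.Dict Int String)
    (rr : Int × List String) :
    List (List (String × String)) × List Int × PySem.Dict Int String :=
  let inner := (PySem.List.enumerate rr.2 0).foldl (pvInnerA fields rr.1)
      (pvTemp0 row_info rr.1, st.2.1, st.2.2)
  (if rr.1 != 0 then st.1 ++ [inner.1.items] else st.1, inner.2.1, inner.2.2)

def pvRowA (d : PySem.Dict Int String) (t : PySem.Dict String String) (l : List (Int × String)) :
    PySem.Dict String String :=
  l.foldl (fun t aa =>
    match d.get? aa.1 with
    | some n => t.insert n aa.2
    | none => t) t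

def pvInsFold (t : PySem.Dict String String) (l : List (String × String)) : PySem.Dict String String :=
  l.foldl (fun t q => t.insert q.1 q.2) t

def pvFA (d : PySem.Dict Int String) (aa : Int × String) : Option (String × String) :=
  match d.get? aa.1 with
  | some n => some (n, aa.2)
  | none => none

def pvFB (row : List String) (p : Int × String) : Option (String × String) :=
  if p.1 < (row.length : Int) then some (p.2, PySem.List.pyGetD row p.1 "") else none

-- B's per-column zip step, named.
def pvColStep (jn : Int × String) (p : PySem.Dict String String × List String) :
    PySem.Dict String String :=
  if jn.1 < (p.2.length : Int) then p.1.insert jn.2 (PySem.List.pyGetD p.2 jn.1 "") else p.1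

lemma portA_eq (lists : List (List String)) (fields : Option (List String)) (row_info : Bool) :
    construct_mapped_dict_py lists fields row_info =
      (if lists.length ≠ 0 then
        ((PySem.List.enumerate lists 0).foldl (pvOuterA fields row_info)
          ([], ([], PySem.Dict.empty))).1
      else []) := rfl

lemma portB_eq (lists : List (List String)) (fields : Option (List String)) (row_info : Bool) :
    construct_mapped_dict_py_alt lists fields row_info =
      (match lists with
       | [] => []
       | header :: rows =>
         ((PySem.List.enumerate header 0).foldl
            (fun (res : List (PySem.Dict String String)) jn =>
              if (match fields with
                  | some fs => !fs.isEmpty && !fs.contains jn.2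
                  | none => false) then res
              else (res.zip rows).map (pvColStep jn))
            ((PySem.List.pyRange 1 ((header :: rows).length : Int) 1).map
              (fun i => pvTemp0 row_info i))).map (fun d => d.items)) := by
  cases lists <;> rfl

-- === A-side characterisation (row-major loop → per-row folds over the index dict) ===

lemma stepA_zero (fields : Option (List String)) (t : PySem.Dict String String)
    (av : List Int) (d : PySem.Dict Int String) (p : Int × String) :
    pvInnerA fields 0 (t, av, d) p =
      if pvKeep fields p.2 then (t, av ++ [p.1], d.insert p.1 p.2) else (t, av, d) := by
  unfold pvInnerA pvKeep
  cases fields with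
  | none => simp
  | some fs => cases fs <;> simp

lemma innerA_zero (fields : Option (List String)) (l : List (Int × String))
    (t : PySem.Dict String String) (av : List Int) (d : PySem.Dict Int String) :
    l.foldl (pvInnerA fields 0) (t, av, d) =
      (t, av ++ (l.filter (fun p => pvKeep fields p.2)).map (·.1),
          (l.filter (fun p => pvKeep fields p.2)).foldl (fun d p => d.insert p.1 p.2) d) := by
  induction l generalizing av d with
  | nil => simp
  | cons p tl ih =>
    rw [List.foldl_cons, stepA_zero, List.filter_cons]
    by_cases h : pvKeep fields p.2 = true
    · simp only [h, if_true]
      rw [ih]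
      simp
    · rw [Bool.not_eq_true] at h
      simp only [h, Bool.false_eq_true, if_false]
      rw [ih]

lemma stepA_nonzero (fields : Option (List String)) (ri : Int) (hri : ri ≠ 0)
    (t : PySem.Dict String String) (av : List Int) (d : PySem.Dict Int String) (aa : Int × String) :
    pvInnerA fields ri (t, av, d) aa =
      ((match d.get? aa.1 with
        | some n => t.insert n aa.2
        | none => t), av, d) := by
  unfold pvInnerA
  have : (ri == 0) = false := by simpa using hri
  rw [this]
  simp only [Bool.false_eq_true, if_false]
  cases h : d.get? aa.1 with
  | none =>
    have : d.contains aa.1 = false := by rw [PySem.Dict.contains_eq_isSome_get?, h]; rfl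
    simp [this]
  | some n =>
    have hc : d.contains aa.1 = true := by rw [PySem.Dict.contains_eq_isSome_get?, h]; rfl
    have hg : d.getD aa.1 "" = n := by rw [PySem.Dict.getD_eq_get?_getD, h]; rfl
    simp [hc, hg]

lemma innerA_nonzero (fields : Option (List String)) (ri : Int) (hri : ri ≠ 0)
    (l : List (Int × String)) (t : PySem.Dict String String) (av : List Int)
    (d : PySem.Dict Int String) :
    l.foldl (pvInnerA fields ri) (t, av, d) = (pvRowA d t l, av, d) := by
  induction l generalizing t with
  | nil => rfl
  | cons aa tl ih =>
    rw [List.foldl_cons, stepA_nonzero fields ri hri]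
    rw [ih]
    rfl

lemma outerA_rows (fields : Option (List String)) (row_info : Bool) (rest : List (List String))
    (s : Int) (hs : 1 ≤ s) (cdl : List (List (String × String))) (av : List Int)
    (d : PySem.Dict Int String) :
    (PySem.List.enumerate rest s).foldl (pvOuterA fields row_info) (cdl, av, d) =
      (cdl ++ (PySem.List.enumerate rest s).map (fun rr =>
          (pvRowA d (pvTemp0 row_info rr.1) (PySem.List.enumerate rr.2 0)).items), av, d) := by
  induction rest generalizing s cdl with
  | nil => simp [PySem.List.enumerate]
  | cons r rs ih =>
    rw [PySem.List.enumerate_cons, List.foldl_cons]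
    have hstep : pvOuterA fields row_info (cdl, av, d) (s, r) =
        (cdl ++ [(pvRowA d (pvTemp0 row_info s) (PySem.List.enumerate r 0)).items], av, d) := by
      unfold pvOuterA
      rw [innerA_nonzero fields s (by omega)]
      have : (s != 0) = true := by simp; omega
      rw [this]
      simp
    rw [hstep, ih (s + 1) (by omega), List.map_cons]
    simp

lemma foldl_match_filterMap (d : PySem.Dict Int String) (l : List (Int × String))
    (t : PySem.Dict String String) :
    pvRowA d t l = pvInsFold t (l.filterMap (pvFA d)) := by
  induction l generalizing t with
  | nil => rfl
  | cons aa tl ih =>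
    unfold pvRowA pvFA
    rw [List.foldl_cons, List.filterMap_cons]
    cases h : d.get? aa.1 with
    | none => simp only [h]; exact ih t
    | some n => simp only [h]; exact ih (t.insert n aa.2)

lemma foldl_if_filterMap (row : List String) (l : List (Int × String))
    (t : PySem.Dict String String) :
    l.foldl (fun td p => pvColStep p (td, row)) t = pvInsFold t (l.filterMap (pvFB row)) := by
  induction l generalizing t with
  | nil => rfl
  | cons p tl ih =>
    rw [List.foldl_cons, List.filterMap_cons]
    by_cases h : p.1 < (row.length : Int)
    · rw [show pvColStep p (t, row) = t.insert p.2 (PySem.List.pyGetD row p.1 "") from by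
          unfold pvColStep; rw [if_pos h],
        show pvFB row p = some (p.2, PySem.List.pyGetD row p.1 "") from by
          unfold pvFB; rw [if_pos h]]
      rw [ih]; rfl
    · rw [show pvColStep p (t, row) = t from by unfold pvColStep; rw [if_neg h],
        show pvFB row p = none from by unfold pvFB; rw [if_neg h]]
      exact ih t

lemma get?_mk_eq_none_of_forall_ne (il : List (Int × String)) (j : Int)
    (h : ∀ p ∈ il, p.1 ≠ j) : (PySem.Dict.mk il).get? j = none := by
  induction il with
  | nil => rfl
  | cons p tl ih =>
    have hp : p = (p.1, p.2) := rfl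
    rw [hp, PySem.Dict.get?_mk_cons]
    have : (p.1 == j) = false := by
      simp only [beq_eq_false_iff_ne]
      exact h p (List.mem_cons_self ..)
    rw [this]
    simp only [Bool.false_eq_true, if_false]
    exact ih (fun q hq => h q (List.mem_cons_of_mem _ hq))

lemma core_filterMap (il : List (Int × String)) (row : List String)
    (hs : il.Pairwise (fun p q => p.1 < q.1)) (hn : ∀ p ∈ il, 0 ≤ p.1) :
    (PySem.List.enumerate row 0).filterMap (pvFA (PySem.Dict.mk il))
      = il.filterMap (pvFB row) := by
  induction il with
  | nil =>
    rw [List.filterMap_nil, List.filterMap_eq_nil_iff]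
    intro aa _
    rfl
  | cons p tl ih =>
    obtain ⟨i, n⟩ := p
    have hlt : ∀ q ∈ tl, i < q.1 := by
      intro q hq; exact (List.pairwise_cons.mp hs).1 q hq
    have htl : tl.Pairwise (fun p q => p.1 < q.1) := (List.pairwise_cons.mp hs).2
    have hntl : ∀ p ∈ tl, 0 ≤ p.1 := fun p hp => hn p (List.mem_cons_of_mem _ hp)
    have hi0 : 0 ≤ i := hn (i, n) (List.mem_cons_self ..)
    have hcons : ∀ aa : Int × String, pvFA (PySem.Dict.mk ((i, n) :: tl)) aa =
        if i == aa.1 then some (n, aa.2) else pvFA (PySem.Dict.mk tl) aa := by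
      intro aa
      unfold pvFA
      rw [PySem.Dict.get?_mk_cons]
      by_cases h : (i == aa.1) = true
      · rw [h]; simp
      · rw [Bool.not_eq_true] at h; rw [h]; simp
    rw [List.filterMap_cons]
    by_cases hm : i < (row.length : Int)
    · -- i hits a column of the row
      have hk : i.toNat < row.length := by omega
      have hik : i = (i.toNat : Int) := by omega
      have hrow : row = row.take i.toNat ++ row[i.toNat] :: row.drop (i.toNat + 1) := by
        conv_lhs => rw [← List.take_append_drop i.toNat row]
        rw [List.drop_eq_getElem_cons hk]
      have hlen : (row.take i.toNat).length = i.toNat := by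
        rw [List.length_take]; omega
      have hdecomp : ∀ f : Int × String → Option (String × String),
          (PySem.List.enumerate row 0).filterMap f =
            (PySem.List.enumerate (row.take i.toNat) 0).filterMap f ++
            (f (i, row[i.toNat])).toList ++
            (PySem.List.enumerate (row.drop (i.toNat + 1)) (i + 1)).filterMap f := by
        intro f
        conv_lhs => rw [hrow]
        rw [PySem.List.enumerate_append, PySem.List.enumerate_cons, hlen,
          List.filterMap_append, List.filterMap_cons]
        have h1 : (0 : Int) + (i.toNat : Int) = i := by omega
        rw [h1]
        cases f (i, row[i.toNat]) <;> simp
      have hpre : ∀ aa ∈ PySem.List.enumerate (row.take i.toNat) 0, aa.1 < i := by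
        intro aa haa
        obtain ⟨k, hklen, rfl⟩ := (PySem.List.mem_enumerate_iff _ _ _).mp haa
        show (0 : Int) + (k : Int) < i
        rw [hlen] at hklen
        omega
      have hpost : ∀ aa ∈ PySem.List.enumerate (row.drop (i.toNat + 1)) (i + 1), i < aa.1 := by
        intro aa haa
        obtain ⟨k, hklen, rfl⟩ := (PySem.List.mem_enumerate_iff _ _ _).mp haa
        show i < i + 1 + (k : Int)
        omega
      have hconsL : (PySem.List.enumerate row 0).filterMap (pvFA (PySem.Dict.mk ((i, n) :: tl)))
          = (n, row[i.toNat]) ::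
            (PySem.List.enumerate (row.drop (i.toNat + 1)) (i + 1)).filterMap
              (pvFA (PySem.Dict.mk tl)) := by
        rw [hdecomp]
        have e1 : (PySem.List.enumerate (row.take i.toNat) 0).filterMap
            (pvFA (PySem.Dict.mk ((i, n) :: tl))) = [] := by
          rw [List.filterMap_eq_nil_iff]
          intro aa haa
          rw [hcons]
          have h1 : (i == aa.1) = false := by
            simp only [beq_eq_false_iff_ne]; have := hpre aa haa; omega
          rw [h1]
          simp only [Bool.false_eq_true, if_false]
          unfold pvFA
          rw [get?_mk_eq_none_of_forall_ne]
          intro q hq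
          have := hlt q hq
          have := hpre aa haa
          omega
        have e2 : pvFA (PySem.Dict.mk ((i, n) :: tl)) (i, row[i.toNat]) =
            some (n, row[i.toNat]) := by
          rw [hcons]; simp
        have e3 : (PySem.List.enumerate (row.drop (i.toNat + 1)) (i + 1)).filterMap
            (pvFA (PySem.Dict.mk ((i, n) :: tl))) =
            (PySem.List.enumerate (row.drop (i.toNat + 1)) (i + 1)).filterMap
              (pvFA (PySem.Dict.mk tl)) := by
          apply List.filterMap_congr
          intro aa haa
          rw [hcons]
          have h1 : (i == aa.1) = false := by
            simp only [beq_eq_false_iff_ne]; have := hpost aa haa; omega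
          rw [h1]
          simp
        rw [e1, e2, e3]
        simp
      have htlL : (PySem.List.enumerate row 0).filterMap (pvFA (PySem.Dict.mk tl))
          = (PySem.List.enumerate (row.drop (i.toNat + 1)) (i + 1)).filterMap
              (pvFA (PySem.Dict.mk tl)) := by
        rw [hdecomp]
        have e1 : (PySem.List.enumerate (row.take i.toNat) 0).filterMap
            (pvFA (PySem.Dict.mk tl)) = [] := by
          rw [List.filterMap_eq_nil_iff]
          intro aa haa
          unfold pvFA
          rw [get?_mk_eq_none_of_forall_ne]
          intro q hq
          have := hlt q hq
          have := hpre aa haa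
          omega
        have e2 : pvFA (PySem.Dict.mk tl) (i, row[i.toNat]) = none := by
          unfold pvFA
          rw [get?_mk_eq_none_of_forall_ne]
          intro q hq
          have := hlt q hq
          omega
        rw [e1, e2]
        simp
      rw [hconsL]
      have hfb : pvFB row (i, n) = some (n, row[i.toNat]) := by
        unfold pvFB
        rw [if_pos hm]
        rw [PySem.List.pyGetD_eq_getElem row "" hi0 hm]
      rw [hfb, ← ih htl hntl, htlL]
    · have hfb : pvFB row (i, n) = none := by
        unfold pvFB
        rw [if_neg hm]
      rw [hfb]
      have : (PySem.List.enumerate row 0).filterMap (pvFA (PySem.Dict.mk ((i, n) :: tl)))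
          = (PySem.List.enumerate row 0).filterMap (pvFA (PySem.Dict.mk tl)) := by
        apply List.filterMap_congr
        intro aa haa
        obtain ⟨k, hklen, rfl⟩ := (PySem.List.mem_enumerate_iff _ _ _).mp haa
        rw [hcons]
        have h1 : (i == ((0 : Int) + (k : Int), row[k]).1) = false := by
          simp only [beq_eq_false_iff_ne]
          show i ≠ (0 : Int) + (k : Int)
          omega
        rw [h1]
        simp
      rw [this, ih htl hntl]

lemma filterMap_guard (q : Int × String → Bool) (l : List (Int × String)) :
    l.filterMap (fun p => if q p then some p else none) = l.filter q := by
  induction l with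
  | nil => rfl
  | cons p tl ih =>
    rw [List.filterMap_cons, List.filter_cons]
    by_cases h : q p = true
    · simp only [h, if_true, ih]
    · rw [Bool.not_eq_true] at h
      simp only [h, Bool.false_eq_true, if_false, ih]

lemma pvIdx_sorted (fields : Option (List String)) (header : List String) :
    (pvIdx fields header).Pairwise (fun p q => p.1 < q.1) := by
  unfold pvIdx
  rw [filterMap_guard (fun p => pvKeep fields p.2)]
  exact (PySem.List.pairwise_lt_enumerate header 0).sublist List.filter_sublist

lemma pvIdx_nonneg (fields : Option (List String)) (header : List String) :
    ∀ p ∈ pvIdx fields header, 0 ≤ p.1 := by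
  intro p hp
  unfold pvIdx at hp
  rw [filterMap_guard (fun p => pvKeep fields p.2)] at hp
  have := List.mem_of_mem_filter hp
  obtain ⟨k, hklen, rfl⟩ := (PySem.List.mem_enumerate_iff _ _ _).mp this
  show (0 : Int) ≤ (0 : Int) + (k : Int)
  omega

lemma idx_items (fields : Option (List String)) (header : List String) :
    (((PySem.List.enumerate header 0).filter (fun p => pvKeep fields p.2)).foldl
        (fun (d : PySem.Dict Int String) p => d.insert p.1 p.2) PySem.Dict.empty).items
      = pvIdx fields header := by
  have hfresh : ∀ a ∈ (PySem.List.enumerate header 0).filter (fun p => pvKeep fields p.2),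
      (PySem.Dict.empty : PySem.Dict Int String).contains a.1 = false := by
    intro a _; rfl
  have hnodup : (((PySem.List.enumerate header 0).filter
      (fun p => pvKeep fields p.2)).map (·.1)).Nodup := by
    have hp : ((PySem.List.enumerate header 0).filter
        (fun p => pvKeep fields p.2)).Pairwise (fun p q => p.1 < q.1) :=
      (PySem.List.pairwise_lt_enumerate header 0).sublist List.filter_sublist
    have := (List.pairwise_map (l := (PySem.List.enumerate header 0).filter
        (fun p => pvKeep fields p.2)) (f := (·.1)) (R := (· < · : Int → Int → Prop))).mpr hp
    exact this.imp (fun h => ne_of_lt h)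
  have := PySem.Dict.items_foldl_insert_fresh
      ((PySem.List.enumerate header 0).filter (fun p => pvKeep fields p.2))
      (·.1) (·.2) PySem.Dict.empty hfresh hnodup
  rw [this]
  unfold pvIdx
  rw [filterMap_guard (fun p => pvKeep fields p.2)]
  show ([] : List (Int × String)) ++ _ = _
  simp

lemma row_eq (fields : Option (List String)) (header : List String)
    (t : PySem.Dict String String) (row : List String) :
    pvRowA (PySem.Dict.mk (pvIdx fields header)) t (PySem.List.enumerate row 0)
      = (pvIdx fields header).foldl (fun td p => pvColStep p (td, row)) t := by
  rw [foldl_match_filterMap, foldl_if_filterMap,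
    core_filterMap (pvIdx fields header) row (pvIdx_sorted fields header)
      (pvIdx_nonneg fields header)]

-- === B-side characterisation (column-major loop → per-row folds) ===

lemma skip_eq_not_keep (fields : Option (List String)) (name : String) :
    (match fields with
     | some fs => !fs.isEmpty && !fs.contains name
     | none => false) = !pvKeep fields name := by
  unfold pvKeep
  cases fields <;> simp

lemma foldl_skipB (fields : Option (List String)) (rest : List (List String))
    (l : List (Int × String)) (init : List (PySem.Dict String String)) :
    l.foldl (fun res jn => if (!pvKeep fields jn.2) then res
        else (res.zip rest).map (fun p => pvColStep jn p)) init
      = (l.filter (fun p => pvKeep fields p.2)).foldl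
          (fun res jn => (res.zip rest).map (fun p => pvColStep jn p)) init := by
  induction l generalizing init with
  | nil => rfl
  | cons x tl ih =>
    rw [List.foldl_cons, List.filter_cons]
    by_cases h : pvKeep fields x.2 = true
    · simp only [h, Bool.not_true, Bool.false_eq_true, if_false, if_true, List.foldl_cons]
      exact ih _
    · rw [Bool.not_eq_true] at h
      simp only [h, Bool.not_false, if_true, Bool.false_eq_true, if_false]
      exact ih init

lemma zip_map_zip {δ ρ : Type} (f : δ × ρ → δ) :
    ∀ (res : List δ) (rows : List ρ), res.length = rows.length →
      ((res.zip rows).map f).zip rows = (res.zip rows).map (fun p => (f p, p.2)) := by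
  intro res
  induction res with
  | nil => intro rows _; simp
  | cons d ds ih =>
    intro rows h
    cases rows with
    | nil => simp at h
    | cons r rs =>
      simp only [List.zip_cons_cons, List.map_cons]
      rw [ih rs (by simpa using h)]

lemma foldl_colmajor (g : (Int × String) → PySem.Dict String String × List String → PySem.Dict String String)
    (kept : List (Int × String)) :
    ∀ (res : List (PySem.Dict String String)) (rows : List (List String)),
      res.length = rows.length →
      kept.foldl (fun res jn => (res.zip rows).map (fun p => g jn p)) res
        = (res.zip rows).map (fun p => kept.foldl (fun d jn => g jn (d, p.2)) p.1) := by
  induction kept with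
  | nil =>
    intro res rows h
    simp only [List.foldl_nil]
    have : (res.zip rows).map (fun p => p.1) = res := by
      rw [List.map_fst_zip]
      omega
    conv_lhs => rw [← this]
  | cons c tl ih =>
    intro res rows h
    rw [List.foldl_cons]
    have hlen : ((res.zip rows).map (fun p => g c p)).length = rows.length := by
      rw [List.length_map, List.length_zip]
      omega
    rw [ih _ rows hlen, zip_map_zip (fun p => g c p) res rows h, List.map_map]
    apply List.map_congr_left
    intro p _
    simp

lemma range_map_zip (f : Int → PySem.Dict String String) :
    ∀ (rows : List (List String)) (s : Int),
      ((PySem.List.pyRange s (s + (rows.length : Int)) 1).map f).zip rows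
        = (PySem.List.enumerate rows s).map (fun rr => (f rr.1, rr.2)) := by
  intro rows
  induction rows with
  | nil => intro s; simp [PySem.List.pyRange_zero]
  | cons r rs ih =>
    intro s
    have hcons : PySem.List.pyRange s (s + ((r :: rs).length : Int)) 1
        = s :: PySem.List.pyRange (s + 1) (s + ((r :: rs).length : Int)) 1 := by
      apply PySem.List.pyRange_one_cons
      simp only [List.length_cons]
      push_cast
      omega
    rw [hcons, List.map_cons, List.zip_cons_cons, PySem.List.enumerate_cons, List.map_cons]
    have : s + ((r :: rs).length : Int) = (s + 1) + (rs.length : Int) := by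
      simp only [List.length_cons]
      push_cast
      omega
    rw [this, ih (s + 1)]

-- ===== VERDICT (by name: the statement is the Claim_ definition above) =====
theorem construct_mapped_dict_py_spec : Claim_equal_construct_mapped_dict_py := by
  intro lists fields row_info _ _
  unfold Spec_construct_mapped_dict_py
  rw [portA_eq, portB_eq]
  cases lists with
  | nil => rfl
  | cons header rest =>
    simp only [List.length_cons]
    rw [if_pos (by omega)]
    -- A side
    rw [PySem.List.enumerate_cons, List.foldl_cons]
    have hstep0 : pvOuterA fields row_info ([], ([], PySem.Dict.empty)) (0, header) =
        ([], ((PySem.List.enumerate header 0).filter (fun p => pvKeep fields p.2)).map (·.1),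
          ((PySem.List.enumerate header 0).filter (fun p => pvKeep fields p.2)).foldl
            (fun (d : PySem.Dict Int String) p => d.insert p.1 p.2) PySem.Dict.empty) := by
      unfold pvOuterA
      rw [innerA_zero]
      simp
    rw [hstep0]
    rw [show (0 : Int) + 1 = 1 from rfl]
    rw [outerA_rows fields row_info rest 1 le_rfl]
    simp only [List.nil_append]
    have hd : ((PySem.List.enumerate header 0).filter (fun p => pvKeep fields p.2)).foldl
        (fun (d : PySem.Dict Int String) p => d.insert p.1 p.2) PySem.Dict.empty
        = PySem.Dict.mk (pvIdx fields header) := by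
      apply PySem.Dict.ext
      rw [idx_items]
    -- B side
    have hskip : (fun (res : List (PySem.Dict String String)) (jn : Int × String) =>
        if (match fields with
            | some fs => !fs.isEmpty && !fs.contains jn.2
            | none => false) then res
        else (res.zip rest).map (pvColStep jn))
        = (fun res jn => if (!pvKeep fields jn.2) then res
            else (res.zip rest).map (fun p => pvColStep jn p)) := by
      funext res jn
      rw [skip_eq_not_keep]
    rw [hskip, foldl_skipB fields rest]
    have hfilterIdx : (PySem.List.enumerate header 0).filter (fun p => pvKeep fields p.2)
        = pvIdx fields header := by
      unfold pvIdx
      rw [filterMap_guard (fun p => pvKeep fields p.2)]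
    rw [hfilterIdx] at hd ⊢
    have hcast : (((rest.length + 1 : Nat)) : Int) = 1 + (rest.length : Int) := by
      push_cast; omega
    rw [hcast]
    have hlen0 : ((PySem.List.pyRange 1 (1 + (rest.length : Int)) 1).map
        (fun i => pvTemp0 row_info i)).length = rest.length := by
      rw [List.length_map, PySem.List.length_pyRange_one]
      omega
    rw [foldl_colmajor pvColStep _ _ rest hlen0,
      range_map_zip (fun i => pvTemp0 row_info i) rest 1, List.map_map, List.map_map]
    apply List.map_congr_left
    intro rr _
    simp only [Function.comp_apply]
    rw [hd, row_eq]
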